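-- pv_equiv track=rewrite | github.com/hwzx001/moon-data | 3.17 对社交账号进行分类/parse_social_name.py | parse
-- ===== SOURCE A (Python) =====
-- def parse(data):
--     res=[]
--     temp=str(data).split(',')
--     res.append(temp[0])
--     if len(temp)==1:
--         res.extend(['--']*len(social_keys))
--     else:
--         for i in social_keys:
--             index=find_str(i,temp)
--             if index==-1:
--                 res.append('--')
--             else:
--                 res.append(temp[index])
--     return res
--
-- def find_str(temp,data):
--     # temp 为子串，data为集合
--     for i in range(1, len(data)):
--         if data[i].find(temp) != -1:
--             return i
--     return -1
--
-- social_keys=['amazon', 'boards', 'businessinsider', 'citiesocial', 'cyrillcase', 'decathlon-united', 'desk', 'facebook', 'fleshjack', 'instagram', 'instyle', 'livechatinc', 'mailchi', 'pinterest', 'reddit', 'reddress', 'shopperapproved', 'snapchat', 'spigen', 'stevemadden', 'tiktok', 'twitter', 'vimeo', 'wsj', 'youtube']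
-- ===== SOURCE B (Python) =====
-- social_keys=['amazon', 'boards', 'businessinsider', 'citiesocial', 'cyrillcase', 'decathlon-united', 'desk', 'facebook', 'fleshjack', 'instagram', 'instyle', 'livechatinc', 'mailchi', 'pinterest', 'reddit', 'reddress', 'shopperapproved', 'snapchat', 'spigen', 'stevemadden', 'tiktok', 'twitter', 'vimeo', 'wsj', 'youtube']
--
-- def parse(data):
--     temp = str(data).split(',')
--     found = {}
--     for token in temp[1:]:
--         for key in social_keys:
--             if key not in found and key in token:
--                 found[key] = token
--     return [temp[0]] + [found.get(key, '--') for key in social_keys]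
-- ===== Notes on version B (the rewrite author's own statement) =====
-- stated objective: alternative
-- what changed: Replaces A's per-key rescan of the token list (outer loop over social_keys, each calling find_str which scans all tokens) by one pass over the tokens that builds a first-match dict, then reads the answer off per key; the len==1 special case disappears.
import Mathlib
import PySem

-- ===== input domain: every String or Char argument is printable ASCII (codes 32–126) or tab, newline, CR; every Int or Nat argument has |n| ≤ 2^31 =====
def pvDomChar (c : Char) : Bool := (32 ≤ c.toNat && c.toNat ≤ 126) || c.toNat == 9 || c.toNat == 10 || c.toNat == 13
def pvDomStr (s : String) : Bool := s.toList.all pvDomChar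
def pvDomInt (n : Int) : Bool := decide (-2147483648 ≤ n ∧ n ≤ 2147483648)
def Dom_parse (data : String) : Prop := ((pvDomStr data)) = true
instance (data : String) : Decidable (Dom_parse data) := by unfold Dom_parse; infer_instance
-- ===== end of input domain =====

-- B replaces A's per-key rescan (outer keys, inner find_str over tokens) by one pass over the
-- tokens building a first-match dict, then reading each key off; same results, alternative shape.


def socialKeys : List String :=
  ["amazon", "boards", "businessinsider", "citiesocial", "cyrillcase", "decathlon-united",
   "desk", "facebook", "fleshjack", "instagram", "instyle", "livechatinc", "mailchi",
   "pinterest", "reddit", "reddress", "shopperapproved", "snapchat", "spigen",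
   "stevemadden", "tiktok", "twitter", "vimeo", "wsj", "youtube"]

-- ===== PORT A =====
-- find_str's 'for i in range(1, len(data)): if data[i].find(temp) != -1: return i' / 'return -1'
def findStrLoop (temp : String) (data : List String) : List Int → Int
  | [] => -1
  | i :: rest =>
      if PySem.Str.find (PySem.List.pyGetD data i "") temp ≠ -1 then i
      else findStrLoop temp data rest

def find_str (temp : String) (data : List String) : Int :=
  findStrLoop temp data (PySem.List.pyRange 1 (PySem.List.len data) 1)

def parse (data : String) : List String :=
  let temp := (PySem.Str.split? data ",").getD []   -- sep "," ≠ "", so split? is always some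
  let res := [PySem.List.pyGetD temp 0 ""]          -- temp[0]; split never returns [], so in range
  if PySem.List.len temp = 1 then
    res ++ List.replicate socialKeys.length "--"
  else
    socialKeys.foldl (fun res i =>
      let index := find_str i temp
      if index = -1 then res ++ ["--"]
      else res ++ [PySem.List.pyGetD temp index ""]) res

-- ===== PORT B =====
-- one token pass: found[key] = first token (after temp[0]) containing key
def foundDict (tokens : List String) : PySem.Dict String String :=
  tokens.foldl (fun found token =>
    socialKeys.foldl (fun found key =>
      if !found.contains key && PySem.Str.isIn key token then found.insert key token
      else found) found) PySem.Dict.empty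

def parse_alt (data : String) : List String :=
  let temp := (PySem.Str.split? data ",").getD []
  let found := foundDict (PySem.List.slice temp (some 1) none)
  [PySem.List.pyGetD temp 0 ""] ++ socialKeys.map (fun key => found.getD key "--")

-- ===== PRECONDITION & SPEC =====
def Spec_parse (data : String) (out : List String) : Prop := out = parse_alt data
instance (data : String) (out : List String) : Decidable (Spec_parse data out) := by unfold Spec_parse; infer_instance

-- ===== CLAIM (what is proved, stated in full; the proofs are below) =====
def Claim_equal_parse : Prop := ∀ (data : String), Dom_parse data → Spec_parse data (parse data)

-- ===== LEMMAS AND PROOFS =====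

-- the inner key loop of B, looked up at k
theorem get?_innerFold (t : String) (ks : List String) (d : PySem.Dict String String) (k : String) :
    (ks.foldl (fun found key =>
      if !found.contains key && PySem.Str.isIn key t then found.insert key t
      else found) d).get? k =
    if k ∈ ks ∧ d.get? k = none ∧ PySem.Str.isIn k t then some t else d.get? k := by
  induction ks generalizing d with
  | nil => simp
  | cons key rest ih =>
    simp only [List.foldl_cons, ih]
    by_cases hk : key = k
    · subst hk
      rw [PySem.Dict.contains_eq_isSome_get?]
      cases hd : d.get? key with
      | some v => simp [hd]
      | none =>
        by_cases hin : PySem.Str.isIn key t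
        · have hin' : PySem.Chars.isIn key.toList t.toList = true := by simpa using hin
          simp [hin', PySem.Dict.get?_insert_self]
        · have hin' : PySem.Chars.isIn key.toList t.toList = false := by
            simpa using fun h => hin h
          simp [hd, hin']
    · have hstep : (if !d.contains key && PySem.Str.isIn key t then d.insert key t else d).get? k
        = d.get? k := by
        split
        · exact PySem.Dict.get?_insert_of_ne _ _ (fun h => hk h.symm)
        · rfl
      rw [hstep]
      have hne : k ≠ key := fun h => hk h.symm
      simp [List.mem_cons, hne]

-- the outer token loop of B, looked up at k
theorem get?_foundFold (ts : List String) (d : PySem.Dict String String) (k : String)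
    (hk : k ∈ socialKeys) :
    (ts.foldl (fun found token =>
      socialKeys.foldl (fun found key =>
        if !found.contains key && PySem.Str.isIn key token then found.insert key token
        else found) found) d).get? k =
    ((d.get? k).orElse (fun _ => ts.find? (fun t => PySem.Str.isIn k t))) := by
  induction ts generalizing d with
  | nil => cases hd : d.get? k <;> simp_all [Option.orElse]
  | cons t rest ih =>
    simp only [List.foldl_cons, ih, get?_innerFold]
    cases hd : d.get? k with
    | some v => simp [Option.orElse]
    | none =>
      by_cases hin : PySem.Str.isIn k t
      · have hin' : PySem.Chars.isIn k.toList t.toList = true := by simpa using hin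
        simp [hk, hin', Option.orElse]
      · have hin' : PySem.Chars.isIn k.toList t.toList = false := by simpa using fun h => hin h
        simp [hk, hin', Option.orElse]

theorem foundDict_getD (ts : List String) (k : String) (hk : k ∈ socialKeys) :
    (foundDict ts).getD k "--" = ((ts.find? (fun t => PySem.Str.isIn k t)).getD "--") := by
  rw [PySem.Dict.getD_eq_get?_getD, foundDict, get?_foundFold ts PySem.Dict.empty k hk]
  simp [Option.orElse]

-- A's per-key answer over the suffix starting at index j equals first-match over temp.drop j
theorem findStrLoop_eq_find? (k : String) (temp : List String) (j : Nat) :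
    (if findStrLoop k temp (PySem.List.pyRange (j : Int) (PySem.List.len temp) 1) = -1 then "--"
     else PySem.List.pyGetD temp
       (findStrLoop k temp (PySem.List.pyRange (j : Int) (PySem.List.len temp) 1)) "") =
    ((temp.drop j).find? (fun t => PySem.Str.isIn k t)).getD "--" := by
  by_cases hj : j < temp.length
  · have hcons : PySem.List.pyRange (j : Int) (PySem.List.len temp) 1
        = (j : Int) :: PySem.List.pyRange ((j : Int) + 1) (PySem.List.len temp) 1 := by
      apply PySem.List.pyRange_one_cons
      simp only [PySem.List.len_eq]; omega
    have hdrop : temp.drop j = temp[j] :: temp.drop (j + 1) :=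
      List.drop_eq_getElem_cons hj
    have hget : PySem.List.pyGetD temp (j : Int) "" = temp[j] := by
      simp [PySem.List.pyGetD_natCast, List.getD_eq_getElem?_getD, hj]
    rw [hcons, hdrop]
    by_cases hfind : PySem.Str.find temp[j] k ≠ -1
    · have hin : PySem.Str.isIn k temp[j] = true := by
        rw [PySem.Str.isIn_iff_infix]
        exact (PySem.Str.find_ne_neg_one_iff _ _).mp hfind
      have hstep : findStrLoop k temp
          ((j : Int) :: PySem.List.pyRange ((j : Int) + 1) (PySem.List.len temp) 1) = (j : Int) := by
        simp only [findStrLoop, hget]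
        exact if_pos hfind
      have hinC : PySem.Chars.isIn k.toList temp[j].toList = true := by simpa using hin
      rw [hstep, if_neg (by omega : ¬ (j : Int) = -1), hget,
        List.find?_cons_of_pos (by simpa using hinC)]
      simp
    · have heq : PySem.Str.find temp[j] k = -1 := by omega
      have hnin : ¬ (k.toList <:+: temp[j].toList) := (PySem.Str.find_eq_neg_one_iff _ _).mp heq
      have hin : PySem.Chars.isIn k.toList temp[j].toList = false := by
        simpa using mt (PySem.Str.isIn_iff_infix _ _).mp hnin
      have hstep : findStrLoop k temp
          ((j : Int) :: PySem.List.pyRange ((j : Int) + 1) (PySem.List.len temp) 1)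
          = findStrLoop k temp (PySem.List.pyRange ((j : Int) + 1) (PySem.List.len temp) 1) := by
        simp only [findStrLoop, hget]
        exact if_neg hfind
      have hcast : (j : Int) + 1 = ((j + 1 : Nat) : Int) := by push_cast; ring
      rw [hstep, hcast]
      have ih := findStrLoop_eq_find? k temp (j + 1)
      rw [List.find?_cons_of_neg (by simp [hin])]
      exact ih
  · have hnil : PySem.List.pyRange (j : Int) (PySem.List.len temp) 1 = [] := by
      apply PySem.List.pyRange_one_eq_nil
      simp only [PySem.List.len_eq]; omega
    have hd : temp.drop j = [] := List.drop_eq_nil_of_le (by omega)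
    rw [hnil, hd]
    simp [findStrLoop]
termination_by temp.length - j

-- A's per-key answer = B's
theorem perKey_eq (k : String) (temp : List String) :
    (let index := find_str k temp
     if index = -1 then "--" else PySem.List.pyGetD temp index "") =
    ((temp.drop 1).find? (fun t => PySem.Str.isIn k t)).getD "--" := by
  have h := findStrLoop_eq_find? k temp 1
  simpa [find_str] using h

-- ===== VERDICT (by name: the statement is the Claim_ definition above) =====
theorem parse_spec : Claim_equal_parse := by
  intro data _
  unfold Spec_parse
  show parse data = parse_alt data
  unfold parse parse_alt
  simp only [PySem.List.slice_from_one]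
  set temp := (PySem.Str.split? data ",").getD [] with htemp
  clear htemp
  by_cases hlen : PySem.List.len temp = 1
  · rw [if_pos hlen]
    have hdrop : temp.tail = [] := by
      rw [← List.drop_one]
      apply List.drop_eq_nil_of_le
      simp only [PySem.List.len_eq] at hlen; omega
    congr 1
    symm
    apply List.eq_replicate_iff.mpr
    refine ⟨by simp, ?_⟩
    intro b hb
    obtain ⟨k, hk, hkb⟩ := List.mem_map.mp hb
    rw [← hkb, foundDict_getD _ _ hk, hdrop]
    simp
  · rw [if_neg hlen]
    have hfold : socialKeys.foldl (fun res i =>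
        let index := find_str i temp
        if index = -1 then res ++ ["--"]
        else res ++ [PySem.List.pyGetD temp index ""]) [PySem.List.pyGetD temp 0 ""]
      = [PySem.List.pyGetD temp 0 ""] ++ socialKeys.map (fun k =>
          let index := find_str k temp
          if index = -1 then "--" else PySem.List.pyGetD temp index "") := by
      rw [← PySem.List.foldl_append_singleton_eq_map
        (l := socialKeys)
        (f := fun k => let index := find_str k temp
          if index = -1 then "--" else PySem.List.pyGetD temp index "")
        (acc := [PySem.List.pyGetD temp 0 ""])]
      apply PySem.List.foldl_congr_mem
      intro acc k _
      simp only []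
      split <;> rfl
    rw [hfold]
    congr 1
    apply List.map_congr_left
    intro k hk
    rw [foundDict_getD _ _ hk, ← List.drop_one]
    exact perKey_eq k temp
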